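-- pv_equiv track=rewrite | github.com/aviAVIRAL/MY_WORK | tcs_3_number/32  Replace all the 0’s with 1s .py | f
-- ===== SOURCE A (Python) =====
-- def f(n):
--     y = 0
--     while n > 0:
--         d = n % 10
--         if d == 0 :
--             d = 1
--         y = y * 10 + d
--         n = n // 10
--     return y
-- ===== SOURCE B (Python) =====
-- def f(n):
--     if n <= 0:
--         return 0
--     y = 0
--     for c in str(n)[::-1]:
--         y = y * 10 + (1 if c == '0' else ord(c) - 48)
--     return y
-- ===== Notes on version B (the rewrite author's own statement) =====
-- stated objective: alternative
-- what changed: B extracts digits from the decimal string representation (iterating reversed str(n) with ord) instead of A's modular-arithmetic accumulator loop.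
import Mathlib
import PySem

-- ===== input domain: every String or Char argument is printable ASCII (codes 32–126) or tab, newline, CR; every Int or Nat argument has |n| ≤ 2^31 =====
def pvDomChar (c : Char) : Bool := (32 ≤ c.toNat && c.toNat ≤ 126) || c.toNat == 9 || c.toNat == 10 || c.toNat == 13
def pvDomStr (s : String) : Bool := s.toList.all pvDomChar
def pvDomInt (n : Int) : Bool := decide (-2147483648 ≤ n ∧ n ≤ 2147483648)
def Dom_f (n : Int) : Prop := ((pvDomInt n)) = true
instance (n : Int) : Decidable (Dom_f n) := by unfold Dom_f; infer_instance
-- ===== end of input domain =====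

-- B extracts digits from the decimal string representation instead of A's modular-arithmetic loop;
-- same cost, alternative algorithm.

-- ===== PORT A =====
-- the while loop of A: state (y, n); n strictly decreases (floordiv by 10) while positive
theorem pv_floordiv10_lt (n : Int) (h : 0 < n) :
    (PySem.Int.floordiv n 10).toNat < n.toNat := by
  rw [PySem.Int.floordiv_eq_ediv_of_pos (by norm_num)]
  omega

def fLoopA (y n : Int) : Int :=
  if h : 0 < n then
    let d := PySem.Int.mod n 10
    let d := if d = 0 then 1 else d
    fLoopA (y * 10 + d) (PySem.Int.floordiv n 10)
  else y
termination_by n.toNat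
decreasing_by exact pv_floordiv10_lt n h

def f (n : Int) : Int := fLoopA 0 n

-- ===== PORT B =====
-- the for loop of B over the characters of str(n)[::-1]
def fLoopB (y : Int) (cs : List Char) : Int :=
  match cs with
  | [] => y
  | c :: rest => fLoopB (y * 10 + (if c = '0' then 1 else (c.toNat : Int) - 48)) rest

def f_alt (n : Int) : Int :=
  if n ≤ 0 then 0
  else fLoopB 0 ((PySem.Int.toStr n).toList.reverse)

-- ===== PRECONDITION & SPEC =====
def Spec_f (n : Int) (out : Int) : Prop := out = f_alt n
instance (n : Int) (out : Int) : Decidable (Spec_f n out) := by unfold Spec_f; infer_instance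

-- ===== CLAIM (what is proved, stated in full; the proofs are below) =====
def Claim_equal_f : Prop := ∀ (n : Int), Dom_f n → Spec_f n (f n)

-- ===== LEMMAS AND PROOFS =====

-- most-significant-first decimal digit characters of a natural number
def pvD (n : Nat) : List Char :=
  if _h : n < 10 then [Nat.digitChar n]
  else pvD (n / 10) ++ [Nat.digitChar (n % 10)]
termination_by n
decreasing_by omega

theorem pvD_small {n : Nat} (h : n < 10) : pvD n = [Nat.digitChar n] := by
  rw [pvD]; simp [h]

theorem pvD_big {n : Nat} (h : ¬ n < 10) :
    pvD n = pvD (n / 10) ++ [Nat.digitChar (n % 10)] := by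
  rw [pvD]; simp [h]

-- core's fueled printer computes pvD
theorem toDigitsCore_eq_pvD :
    ∀ (fuel n : Nat) (acc : List Char), n < fuel →
      Nat.toDigitsCore 10 fuel n acc = pvD n ++ acc := by
  intro fuel
  induction fuel with
  | zero => intro n acc h; omega
  | succ fu ih =>
    intro n acc h
    rw [Nat.toDigitsCore]
    by_cases h10 : n < 10
    · have : n / 10 = 0 := by omega
      simp [this, pvD_small h10, Nat.mod_eq_of_lt h10]
    · have hq : n / 10 ≠ 0 := by omega
      have hlt : n / 10 < fu := by omega
      simp only [hq, if_false, ih (n / 10) _ hlt, pvD_big h10, List.append_assoc,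
        List.singleton_append]

theorem toDigits_eq_pvD (n : Nat) : Nat.toDigits 10 n = pvD n := by
  have := toDigitsCore_eq_pvD (n + 1) n [] (by omega)
  simpa [Nat.toDigits] using this

-- one digit: the B step on the digit character equals the A step on the digit value
theorem step_char' : ∀ m : Nat, m < 10 →
    (if Nat.digitChar m = '0' then (1 : Int) else ((Nat.digitChar m).toNat : Int) - 48)
      = (if (m : Int) = 0 then 1 else (m : Int)) := by decide

theorem step_char (m : Nat) (h : m < 10) (y : Int) :
    y * 10 + (if Nat.digitChar m = '0' then 1 else ((Nat.digitChar m).toNat : Int) - 48)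
      = y * 10 + (if (m : Int) = 0 then 1 else (m : Int)) := by
  rw [step_char' m h]

-- the fused loop of A equals B's loop over the reversed digit characters
theorem loopA_eq_loopB (k : Nat) :
    ∀ (n y : Int), 0 < n → n.toNat ≤ k →
      fLoopA y n = fLoopB y ((pvD n.toNat).reverse) := by
  induction k with
  | zero => intro n y hn hk; omega
  | succ k ih =>
    intro n y hn hk
    rw [fLoopA]
    simp only [hn, dite_true]
    have hmod : PySem.Int.mod n 10 = ((n.toNat % 10 : Nat) : Int) := by
      rw [PySem.Int.mod_eq_emod_of_pos (by norm_num)]; omega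
    have hdiv : PySem.Int.floordiv n 10 = ((n.toNat / 10 : Nat) : Int) := by
      rw [PySem.Int.floordiv_eq_ediv_of_pos (by norm_num)]; omega
    by_cases h10 : n.toNat < 10
    · have hq : (n.toNat / 10 : Nat) = 0 := by omega
      rw [fLoopA]
      have : ¬ (0 : Int) < ((n.toNat / 10 : Nat) : Int) := by simp [hq]
      simp only [hdiv, hq, Nat.cast_zero, lt_self_iff_false, dite_false]
      rw [pvD_small h10]
      simp only [List.reverse_singleton, fLoopB]
      rw [step_char n.toNat h10 y, hmod]
      have : (n.toNat % 10 : Nat) = n.toNat := Nat.mod_eq_of_lt h10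
      simp [this]
    · have hqpos : 0 < ((n.toNat / 10 : Nat) : Int) := by
        have : 1 ≤ n.toNat / 10 := by omega
        exact_mod_cast this
      have hqle : ((n.toNat / 10 : Nat) : Int).toNat ≤ k := by
        simp only [Int.toNat_natCast]; omega
      rw [hdiv, ih _ _ hqpos hqle]
      rw [pvD_big h10]
      simp only [List.reverse_append, List.reverse_singleton, List.singleton_append, fLoopB]
      have := step_char (n.toNat % 10) (by omega) y
      rw [this, hmod]
      have hv : ((n.toNat / 10 : Nat) : Int).toNat = n.toNat / 10 := by omega
      rw [hv]

theorem toStr_pos_toList (n : Int) (h : 0 < n) :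
    (PySem.Int.toStr n).toList = pvD n.toNat := by
  rw [PySem.Int.toList_toStr]
  have hneg : ¬ n < 0 := by omega
  simp [PySem.Int.toChars, hneg, toDigits_eq_pvD]

-- ===== VERDICT (by name: the statement is the Claim_ definition above) =====
theorem f_spec : Claim_equal_f := by
  intro n _
  unfold Spec_f f f_alt
  by_cases h : n ≤ 0
  · rw [fLoopA]
    simp [h, not_lt.mpr h]
  · have hn : 0 < n := by omega
    rw [if_neg h, toStr_pos_toList n hn]
    exact loopA_eq_loopB n.toNat n 0 hn le_rfl
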